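-- pv_equiv track=rewrite | github.com/Szybki0o0/Python-Problems-and-Visualization | MoneyFlipCount/MoneyFlipCount.py | count
-- ===== SOURCE A (Python) =====
-- APPEARANCE = 6
--
-- def count(tab):
--     c = 0
--     C = 0
--     prev = ""
--     for i in tab:
--         if i == prev:
--             c += 1
--         else:
--             c = 0
--             c += 1
--             prev = i
--         if c == APPEARANCE:
--             C += 1
--     return C
-- ===== SOURCE B (Python) =====
-- def count(tab):
--     # group-first decomposition: walk run boundaries, count runs of length >= 6
--     total = 0
--     i = 0
--     n = len(tab)
--     while i < n:
--         j = i + 1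
--         while j < n and tab[j] == tab[i]:
--             j += 1
--         if j - i >= 6:
--             total += 1
--         i = j
--     return total
-- ===== Notes on version B (the rewrite author's own statement) =====
-- stated objective: alternative
-- what changed: Replaces A's running streak counter with an exact-==6 trigger by a run-boundary scan: an outer loop advances over maximal runs of equal consecutive elements and counts each run whose length is >= 6 once.
import Mathlib
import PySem

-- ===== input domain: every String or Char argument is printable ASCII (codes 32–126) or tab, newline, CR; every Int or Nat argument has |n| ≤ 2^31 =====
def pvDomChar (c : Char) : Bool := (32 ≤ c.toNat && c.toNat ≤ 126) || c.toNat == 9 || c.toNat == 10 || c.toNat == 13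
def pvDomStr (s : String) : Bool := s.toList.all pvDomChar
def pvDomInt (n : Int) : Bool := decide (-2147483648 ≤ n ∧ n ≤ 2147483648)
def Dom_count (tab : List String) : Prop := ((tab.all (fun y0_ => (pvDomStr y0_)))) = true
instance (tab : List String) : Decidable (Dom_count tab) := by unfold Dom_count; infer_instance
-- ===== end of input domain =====

-- B replaces A's streak counter with a run-boundary scan (count maximal runs of length ≥ 6); alternative decomposition, same cost.

-- ===== PORT A =====
def APPEARANCE : Int := 6

-- the for-loop of A as structural recursion over the same state (c, C, prev)
def countLoop : List String → Int → Int → String → Int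
  | [], _, C, _ => C
  | i :: t, c, C, prev =>
    let c2 := if i == prev then c + 1 else 1
    let prev2 := if i == prev then prev else i
    let C2 := if c2 == APPEARANCE then C + 1 else C
    countLoop t c2 C2 prev2

def count (tab : List String) : Int := countLoop tab 0 0 ""

-- ===== PORT B =====
-- outer loop over run boundaries: measure each maximal run, count it if its length ≥ 6
def countRuns : List String → Int
  | [] => 0
  | x :: t =>
    let run := t.takeWhile (fun y => y == x)
    let rest := t.dropWhile (fun y => y == x)
    (if 6 ≤ (run.length : Int) + 1 then 1 else 0) + countRuns rest
termination_by l => l.length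
decreasing_by
  simpa using Nat.lt_succ_of_le (List.length_dropWhile_le _ t)

def count_alt (tab : List String) : Int := countRuns tab

-- ===== PRECONDITION & SPEC =====
def Spec_count (tab : List String) (out : Int) : Prop := out = count_alt tab
instance (tab : List String) (out : Int) : Decidable (Spec_count tab out) := by unfold Spec_count; infer_instance

-- ===== CLAIM (what is proved, stated in full; the proofs are below) =====
def Claim_equal_count : Prop := ∀ (tab : List String), Dom_count tab → Spec_count tab (count tab)

-- ===== LEMMAS AND PROOFS =====

-- consuming a block of elements equal to prev advances c by its length and triggers C at most once
lemma countLoop_run (r : List String) (rest : List String) (c C : Int) (prev : String)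
    (h : ∀ y ∈ r, y = prev) :
    countLoop (r ++ rest) c C prev =
      countLoop rest (c + r.length)
        (C + if c < 6 ∧ 6 ≤ c + (r.length : Int) then 1 else 0) prev := by
  induction r generalizing c C with
  | nil =>
    have h0 : ¬((c : Int) < 6 ∧ 6 ≤ c) := by omega
    simp [h0]
  | cons y r ih =>
    have hy : y = prev := h y (by simp)
    have hr : ∀ z ∈ r, z = prev := fun z hz => h z (by simp [hz])
    simp only [List.cons_append, countLoop, hy, beq_self_eq_true, if_true]
    rw [ih _ _ hr]
    simp only [List.length_cons, Nat.cast_add, Nat.cast_one]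
    congr 1
    · ring
    · simp only [APPEARANCE, beq_iff_eq]
      split_ifs <;> omega

-- head of dropWhile fails the predicate
lemma dropWhile_head_false {α : Type} (p : α → Bool) (t : List α) (y : α) (r : List α)
    (h : t.dropWhile p = y :: r) : p y = false := by
  induction t with
  | nil => simp at h
  | cons a t ih =>
    rw [List.dropWhile_cons] at h
    by_cases hp : p a = true
    · simp [hp] at h; exact ih h
    · simp [hp] at h
      rcases h with ⟨h1, _⟩
      subst h1
      simpa using hp

-- main invariant: from the state just after entering a fresh run
lemma countLoop_key : ∀ (n : ℕ) (t : List String) (x : String) (C : Int), t.length ≤ n →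
    countLoop t 1 C x =
      C + ((if 6 ≤ ((t.takeWhile (fun y => y == x)).length : Int) + 1 then 1 else 0) +
        countRuns (t.dropWhile (fun y => y == x))) := by
  intro n
  induction n with
  | zero =>
    intro t x C ht
    have : t = [] := List.length_eq_zero_iff.mp (Nat.le_zero.mp ht)
    subst this
    norm_num [countLoop, countRuns]
  | succ n ih =>
    intro t x C ht
    set run := t.takeWhile (fun y => y == x) with hrun
    set rest := t.dropWhile (fun y => y == x) with hrest
    have hsplit : run ++ rest = t := List.takeWhile_append_dropWhile
    have hall : ∀ y ∈ run, y = x := by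
      intro y hy
      have := List.mem_takeWhile_imp hy
      simpa [beq_iff_eq] using this
    have hL : countLoop t 1 C x =
        countLoop rest (1 + (run.length : Int))
          (C + if (1 : Int) < 6 ∧ 6 ≤ 1 + (run.length : Int) then 1 else 0) x := by
      conv_lhs => rw [← hsplit]
      exact countLoop_run run rest 1 C x hall
    rw [hL]
    have hind : (if (1 : Int) < 6 ∧ 6 ≤ 1 + (run.length : Int) then (1 : Int) else 0) =
        (if 6 ≤ (run.length : Int) + 1 then 1 else 0) := by
      split_ifs <;> omega
    rw [hind]
    cases hr : rest with
    | nil =>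
      simp [countLoop, countRuns]
    | cons y rt =>
      have hyx : (y == x) = false := dropWhile_head_false _ t y rt (hrest ▸ hr)
      have hlen : rt.length ≤ n := by
        have h1 : rest.length ≤ t.length := hrest ▸ List.length_dropWhile_le _ t
        rw [hr] at h1
        simp only [List.length_cons] at h1
        omega
      have h6 : ((1 : Int) == APPEARANCE) = false := by decide
      simp only [countLoop, hyx, Bool.false_eq_true, if_false, h6]
      rw [ih rt y _ hlen]
      conv_rhs => rw [show countRuns (y :: rt) =
        (if 6 ≤ ((rt.takeWhile (fun z => z == y)).length : Int) + 1 then 1 else 0) +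
          countRuns (rt.dropWhile (fun z => z == y)) from by rw [countRuns]]
      ring

-- ===== VERDICT (by name: the statement is the Claim_ definition above) =====
theorem count_spec : Claim_equal_count := by
  intro tab _
  unfold Spec_count count count_alt
  cases tab with
  | nil => simp [countLoop, countRuns]
  | cons x t =>
    have hstep : countLoop (x :: t) 0 0 "" = countLoop t 1 0 x := by
      simp only [countLoop]
      by_cases hx : (x == "") = true
      · have : x = "" := by simpa [beq_iff_eq] using hx
        subst this
        simp [APPEARANCE]
      · simp [hx, APPEARANCE]
    rw [hstep, countLoop_key t.length t x 0 le_rfl, countRuns]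
    simp
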